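-- pv_equiv track=rewrite | github.com/JJLLWW/google_code_jam | 2022_round1A/q1.py | solve
-- ===== SOURCE A (Python) =====
-- def solve(s):
--     i, l = 0, len(s)
--     res = ''
--     while True:
--         # get block of character
--         char = s[i]
--         for j in range(i, l):
--             if s[j] != char:
--                 j -= 1
--                 break
--         if j == l - 1:
--             # this is the last block, dont double
--             nchrs_block = (j-i)+1
--             res += char*(nchrs_block)
--             return res
--         # compare it to character at the end
--         endchar = s[j+1]
--         nchrs_block = (j-i)+1
--         if char < endchar:
--             # double
--             res += char*(2*nchrs_block)
--         else:
--             # don't double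
--             res += char*(nchrs_block)
--         i = j+1
-- ===== SOURCE B (Python) =====
-- def solve(s):
--     # pass 1: run-length encode the string
--     runs = []
--     cur, n = None, 0
--     for c in s:
--         if c == cur:
--             n += 1
--         else:
--             if n:
--                 runs.append((cur, n))
--             cur, n = c, 1
--     if n:
--         runs.append((cur, n))
--     # pass 2: emit each run, doubled when its char is smaller than the next run's char
--     parts = []
--     for k in range(len(runs)):
--         c, m = runs[k]
--         if k + 1 < len(runs) and c < runs[k + 1][0]:
--             parts.append(c * (2 * m))
--         else:
--             parts.append(c * m)
--     return ''.join(parts)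
-- ===== Notes on version B (the rewrite author's own statement) =====
-- stated objective: alternative
-- what changed: A interleaves one index-based while-loop over the string with an inner for-range/break scan and a growing result string; B makes two separate passes: it run-length encodes the string into a list of (char, count) runs, then emits each run (doubled when its char is smaller than the next run's char) and joins the parts. Pre_ excludes only the empty string, on which A raises IndexError.
import Mathlib
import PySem

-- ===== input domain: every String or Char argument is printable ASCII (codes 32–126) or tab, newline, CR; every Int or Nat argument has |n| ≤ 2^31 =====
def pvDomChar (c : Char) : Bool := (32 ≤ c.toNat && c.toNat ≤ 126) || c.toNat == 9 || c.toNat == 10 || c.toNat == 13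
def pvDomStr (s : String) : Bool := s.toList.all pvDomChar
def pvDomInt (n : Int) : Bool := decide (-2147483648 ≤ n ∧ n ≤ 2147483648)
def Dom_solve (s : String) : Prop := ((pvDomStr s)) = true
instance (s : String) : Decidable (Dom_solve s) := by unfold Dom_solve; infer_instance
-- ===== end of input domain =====

-- B replaces A's interleaved index/accumulator while-loop (with its inner for-range/break scan)
-- by two separate passes: run-length encode the string, then emit the runs (objective: alternative).

-- char*n (Python string repetition)
def pvRep (n : Nat) (c : Char) : String := String.ofList (List.replicate n c)

-- ===== PORT A =====
-- A's inner 'for j in range(i, l): if s[j] != char: j -= 1; break' — returns the final j.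
def findJ (cs : List Char) (char : Char) (l : Nat) (j : Nat) : Nat :=
  if j < l then
    if cs.getD j ' ' ≠ char then j - 1 else findJ cs char l (j + 1)
  else l - 1
termination_by l - j

-- A's 'while True' loop; fuel only makes the recursion total (under Pre_ it never runs out).
def loopA (cs : List Char) (l : Nat) : Nat → Nat → String → String
  | 0, _, res => res
  | fuel + 1, i, res =>
    let char := cs.getD i ' '
    let j := findJ cs char l i
    if j = l - 1 then res ++ pvRep (j - i + 1) char
    else
      let endchar := cs.getD (j + 1) ' '
      let nb := j - i + 1
      if char < endchar then loopA cs l fuel (j + 1) (res ++ pvRep (2 * nb) char)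
      else loopA cs l fuel (j + 1) (res ++ pvRep nb char)

def solve (s : String) : String :=
  let cs := s.toList
  loopA cs cs.length cs.length 0 ""

-- ===== PORT B =====
-- B's pass-1 loop body: state = (runs, cur, n); Python's 'cur = None' is `none`.
def runStep (st : List (Char × Nat) × Option Char × Nat) (c : Char) :
    List (Char × Nat) × Option Char × Nat :=
  let (runs, cur, n) := st
  if some c = cur then (runs, cur, n + 1)
  else ((if n ≠ 0 then runs ++ [(cur.getD ' ', n)] else runs), some c, 1)

def buildRuns (cs : List Char) : List (Char × Nat) :=
  let (runs, cur, n) := cs.foldl runStep ([], none, 0)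
  if n ≠ 0 then runs ++ [(cur.getD ' ', n)] else runs

-- B's pass-2 loop body for index k
def emitPart (runs : List (Char × Nat)) (k : Nat) : String :=
  let (c, m) := runs.getD k (' ', 0)
  if k + 1 < runs.length ∧ c < (runs.getD (k + 1) (' ', 0)).1 then pvRep (2 * m) c
  else pvRep m c

def solve_alt (s : String) : String :=
  let runs := buildRuns s.toList
  String.join ((List.range runs.length).map (emitPart runs))

-- ===== PRECONDITION & SPEC =====
-- Pre_ excludes only the empty string, on which A raises IndexError (s[0]).
def Pre_solve (s : String) : Prop := s ≠ ""
instance (s : String) : Decidable (Pre_solve s) := by unfold Pre_solve; infer_instance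
def pvWitness_solve : String := "aab"

def Spec_solve (s : String) (out : String) : Prop := out = solve_alt s
instance (s : String) (out : String) : Decidable (Spec_solve s out) := by unfold Spec_solve; infer_instance

-- ===== CLAIM (what is proved, stated in full; the proofs are below) =====
def Claim_equal_solve : Prop := ∀ (s : String), Dom_solve s → Pre_solve s → Spec_solve s (solve s)

-- ===== LEMMAS AND PROOFS =====

-- run-length scanner shared by the proof-layer specs below
def countRun (cs : List Char) (c : Char) (n : Nat) : Nat :=
  if n < cs.length ∧ cs.getD n ' ' = c then countRun cs c (n + 1) else n
termination_by cs.length - n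

theorem countRun_ge (cs : List Char) (c : Char) (n : Nat) : n ≤ countRun cs c n := by
  induction hn : cs.length - n generalizing n with
  | zero =>
    rw [countRun]
    split
    · omega
    · exact le_refl n
  | succ k ih =>
    rw [countRun]
    split
    · exact le_trans (Nat.le_succ n) (ih (n + 1) (by omega))
    · exact le_refl n

-- the common recursive specification: peel off the leading run, recurse on the rest
def specGo : List Char → String
  | [] => ""
  | c :: tl =>
    let n := countRun (c :: tl) c 1
    let rest := (c :: tl).drop n
    match rest with
    | [] => pvRep n c
    | d :: _ => (if c < d then pvRep (2 * n) c else pvRep n c) ++ specGo rest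
termination_by cs => cs.length
decreasing_by
  have h1 : 1 ≤ countRun (c :: tl) c 1 := countRun_ge (c :: tl) c 1
  simp only [List.length_drop, List.length_cons]
  omega

-- the run list the recursive spec would produce
def runsRec : List Char → List (Char × Nat)
  | [] => []
  | c :: tl =>
    (c, countRun (c :: tl) c 1) :: runsRec ((c :: tl).drop (countRun (c :: tl) c 1))
termination_by cs => cs.length
decreasing_by
  have h1 : 1 ≤ countRun (c :: tl) c 1 := countRun_ge (c :: tl) c 1
  simp only [List.length_drop, List.length_cons]
  omega

-- structural form of B's pass 2
def emitRec : List (Char × Nat) → String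
  | [] => ""
  | (c, m) :: rest =>
    (match rest with
     | [] => pvRep m c
     | (d, _) :: _ => if c < d then pvRep (2 * m) c else pvRep m c) ++ emitRec rest

theorem getD_drop (cs : List Char) (i k : Nat) (d : Char) :
    (cs.drop i).getD k d = cs.getD (i + k) d := by
  rw [List.getD_eq_getElem?_getD, List.getD_eq_getElem?_getD, List.getElem?_drop]

theorem countRun_le (cs : List Char) (c : Char) (n : Nat) (h : n ≤ cs.length) :
    countRun cs c n ≤ cs.length := by
  induction hn : cs.length - n generalizing n with
  | zero =>
    rw [countRun]
    split
    · omega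
    · exact h
  | succ k ih =>
    rw [countRun]
    split
    · exact ih (n + 1) (by omega) (by omega)
    · exact h

theorem countRun_shift (cs : List Char) (c : Char) (i k : Nat) :
    countRun cs c (i + k) = i + countRun (cs.drop i) c k := by
  induction hn : cs.length - (i + k) generalizing k with
  | zero =>
    conv_lhs => rw [countRun]
    conv_rhs => rw [countRun]
    have hlen : (cs.drop i).length = cs.length - i := List.length_drop
    rw [getD_drop]
    split
    · omega
    · split
      · omega
      · rfl
  | succ m ih =>
    conv_lhs => rw [countRun]
    conv_rhs => rw [countRun]
    have hlen : (cs.drop i).length = cs.length - i := List.length_drop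
    rw [getD_drop]
    by_cases hc : i + k < cs.length ∧ cs.getD (i + k) ' ' = c
    · rw [if_pos hc, if_pos ⟨by omega, hc.2⟩]
      have := ih (k + 1) (by omega)
      rw [← Nat.add_assoc] at this
      exact this
    · rw [if_neg hc, if_neg (fun hh => hc ⟨by omega, hh.2⟩)]

theorem countRun_zero_takeWhile (cs : List Char) (c : Char) :
    countRun cs c 0 = (cs.takeWhile (fun x => x = c)).length := by
  induction cs with
  | nil => rw [countRun]; simp
  | cons x tl ih =>
    rw [countRun]
    by_cases hx : x = c
    · have h1 : countRun (x :: tl) c 1 = 1 + countRun tl c 0 := by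
        simpa using countRun_shift (x :: tl) c 1 0
      subst hx
      rw [if_pos ⟨by simp, by simp⟩, h1, ih]
      simp
      omega
    · simp [List.takeWhile, hx]

theorem drop_takeWhile_len (cs : List Char) (p : Char → Bool) :
    cs.drop (cs.takeWhile p).length = cs.dropWhile p := by
  induction cs with
  | nil => rfl
  | cons x tl ih =>
    by_cases hx : p x
    · simp [List.takeWhile, List.dropWhile, hx, ih]
    · simp [List.takeWhile, List.dropWhile, hx]

theorem countRun_head (c : Char) (tl : List Char) :
    countRun (c :: tl) c 1 = 1 + (tl.takeWhile (fun x => x = c)).length := by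
  have h1 : countRun (c :: tl) c 1 = 1 + countRun tl c 0 := by
    simpa using countRun_shift (c :: tl) c 1 0
  rw [h1, countRun_zero_takeWhile]

theorem runsRec_tw (c : Char) (tl : List Char) :
    runsRec (c :: tl) =
      (c, 1 + (tl.takeWhile (fun x => x = c)).length) ::
        runsRec (tl.dropWhile (fun x => x = c)) := by
  have hd : (c :: tl).drop (1 + (tl.takeWhile (fun x => x = c)).length) =
      tl.dropWhile (fun x => x = c) := by
    rw [Nat.add_comm, List.drop_succ_cons, drop_takeWhile_len]
  rw [runsRec, countRun_head, hd]

-- B's pass-1 fold, finished, equals the recursive run list (invariant form)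
def finishRuns (st : List (Char × Nat) × Option Char × Nat) : List (Char × Nat) :=
  let (runs, cur, n) := st
  if n ≠ 0 then runs ++ [(cur.getD ' ', n)] else runs

theorem fold_runs (cs : List Char) :
    ∀ (runs : List (Char × Nat)) (c : Char) (n : Nat), 0 < n →
      finishRuns (cs.foldl runStep (runs, some c, n)) =
        runs ++ (c, n + (cs.takeWhile (fun x => x = c)).length) ::
          runsRec (cs.dropWhile (fun x => x = c)) := by
  induction cs with
  | nil =>
    intro runs c n hn
    simp [finishRuns, runsRec, Nat.pos_iff_ne_zero.mp hn]
  | cons x tl ih =>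
    intro runs c n hn
    by_cases hx : x = c
    · subst hx
      rw [List.foldl_cons]
      have hstep : runStep (runs, some x, n) x = (runs, some x, n + 1) := by
        simp [runStep]
      rw [hstep, ih runs x (n + 1) (by omega)]
      simp [List.takeWhile, List.dropWhile]
      omega
    · rw [List.foldl_cons]
      have hstep : runStep (runs, some c, n) x =
          (runs ++ [(c, n)], some x, 1) := by
        simp [runStep, Option.getD, hx, Nat.pos_iff_ne_zero.mp hn]
      rw [hstep, ih (runs ++ [(c, n)]) x 1 (by omega)]
      have hxc : (decide (x = c)) = false := by simp [hx]
      simp only [List.takeWhile_cons, List.dropWhile_cons, hxc, Bool.false_eq_true,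
        if_false, List.length_nil, Nat.add_zero]
      rw [runsRec_tw]
      simp

theorem buildRuns_eq (cs : List Char) : buildRuns cs = runsRec cs := by
  cases cs with
  | nil => simp [buildRuns, runsRec]
  | cons x tl =>
    show finishRuns ((x :: tl).foldl runStep ([], none, 0)) = _
    rw [List.foldl_cons]
    have hstep : runStep ([], none, 0) x = ([], some x, 1) := by simp [runStep]
    rw [hstep, fold_runs tl [] x 1 (by omega), runsRec_tw]
    simp

theorem strFoldl_shift (l : List String) (x : String) :
    l.foldl (· ++ ·) x = x ++ l.foldl (· ++ ·) "" := by
  induction l generalizing x with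
  | nil => simp
  | cons a l ih =>
    rw [List.foldl_cons, List.foldl_cons, ih (x ++ a), ih ("" ++ a)]
    simp [String.append_assoc]

theorem strJoin_cons (a : String) (l : List String) :
    String.join (a :: l) = a ++ String.join l := by
  show (a :: l).foldl (· ++ ·) "" = a ++ l.foldl (· ++ ·) ""
  rw [List.foldl_cons, strFoldl_shift]
  simp

theorem emitRec_cons₂ (c : Char) (m : Nat) (d : Char) (k : Nat) (L : List (Char × Nat)) :
    emitRec ((c, m) :: (d, k) :: L) =
      (if c < d then pvRep (2 * m) c else pvRep m c) ++ emitRec ((d, k) :: L) := rfl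

-- B's pass 2 (range-map-join) equals its structural form
theorem emit_eq (runs : List (Char × Nat)) :
    String.join ((List.range runs.length).map (emitPart runs)) = emitRec runs := by
  induction runs with
  | nil => rfl
  | cons r rs ih =>
    obtain ⟨c, m⟩ := r
    rw [List.length_cons, List.range_succ_eq_map]
    rw [List.map_cons, List.map_map]
    have hshift : (emitPart ((c, m) :: rs)) ∘ Nat.succ = emitPart rs := by
      funext k
      simp [emitPart]
    rw [hshift, strJoin_cons, ih]
    cases rs with
    | nil => simp [emitRec, emitPart]
    | cons r2 rs2 =>
      obtain ⟨d, m2⟩ := r2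
      rw [emitRec_cons₂]
      congr 1
      simp [emitPart]

theorem runsRec_unfold (c : Char) (tl : List Char) :
    runsRec (c :: tl) =
      (c, countRun (c :: tl) c 1) :: runsRec ((c :: tl).drop (countRun (c :: tl) c 1)) := by
  rw [runsRec]

theorem specGo_emit (cs : List Char) : emitRec (runsRec cs) = specGo cs := by
  induction cs using specGo.induct with
  | case1 => simp [runsRec, specGo, emitRec]
  | case2 c tl _n _rest hrest =>
    rw [runsRec, specGo, show List.drop (countRun (c :: tl) c 1) (c :: tl) = [] from hrest]
    simp [emitRec, runsRec]
  | case3 c tl _n _rest d2 tl2 hrest ih =>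
    have ih2 : emitRec (runsRec (d2 :: tl2)) = specGo (d2 :: tl2) := by
      rw [show (d2 :: tl2) = List.drop (countRun (c :: tl) c 1) (c :: tl) from hrest.symm]
      exact ih
    rw [runsRec, specGo, show List.drop (countRun (c :: tl) c 1) (c :: tl) = d2 :: tl2 from hrest]
    rw [runsRec_unfold d2 tl2, emitRec_cons₂, ← runsRec_unfold d2 tl2, ih2]

theorem findJ_eq (cs : List Char) (c : Char) (j : Nat) (h : j ≤ cs.length) :
    findJ cs c cs.length j = countRun cs c j - 1 := by
  induction hn : cs.length - j generalizing j with
  | zero =>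
    have hj : j = cs.length := by omega
    conv_lhs => rw [findJ]
    conv_rhs => rw [countRun]
    simp [hj]
  | succ m ih =>
    conv_lhs => rw [findJ]
    conv_rhs => rw [countRun]
    have hj : j < cs.length := by omega
    rw [if_pos hj]
    by_cases hc : cs.getD j ' ' = c
    · rw [if_neg (by simp only [ne_eq, not_not]; exact hc), if_pos ⟨hj, hc⟩]
      exact ih (j + 1) (by omega) (by omega)
    · rw [if_pos hc, if_neg (fun hh => hc hh.2)]

theorem loopA_eq (cs : List Char) (fuel i : Nat) (res : String)
    (hi : i < cs.length) (hf : cs.length - i ≤ fuel) :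
    loopA cs cs.length fuel i res = res ++ specGo (cs.drop i) := by
  induction fuel generalizing i res with
  | zero => omega
  | succ fuel ih =>
    have hdrop : cs.drop i = cs.getD i ' ' :: cs.drop (i + 1) := by
      rw [List.getD_eq_getElem?_getD, List.getElem?_eq_getElem hi]
      exact (List.drop_eq_getElem_cons hi).trans rfl
    set char := cs.getD i ' ' with hchar
    have hshift : countRun cs char i = i + countRun (cs.drop i) char 0 := by
      simpa using countRun_shift cs char i 0
    have hstep0 : countRun (cs.drop i) char 0 = countRun (cs.drop i) char 1 := by
      rw [countRun]
      rw [if_pos ⟨by rw [hdrop]; simp, by rw [hdrop]; simp⟩]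
    set m := countRun (cs.drop i) char 1 with hm
    have hm1 : 1 ≤ m := countRun_ge _ _ _
    have hmle : m ≤ (cs.drop i).length := countRun_le _ _ _ (by rw [hdrop]; simp)
    have hdl : (cs.drop i).length = cs.length - i := List.length_drop
    have hj : findJ cs char cs.length i = i + m - 1 := by
      rw [findJ_eq cs char i (le_of_lt hi), hshift, hstep0]
    show (if findJ cs char cs.length i = cs.length - 1 then
            res ++ pvRep (findJ cs char cs.length i - i + 1) char
          else
            if char < cs.getD (findJ cs char cs.length i + 1) ' ' then
              loopA cs cs.length fuel (findJ cs char cs.length i + 1)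
                (res ++ pvRep (2 * (findJ cs char cs.length i - i + 1)) char)
            else
              loopA cs cs.length fuel (findJ cs char cs.length i + 1)
                (res ++ pvRep (findJ cs char cs.length i - i + 1) char)) = _
    rw [hj]
    have hcount : i + m - 1 - i + 1 = m := by omega
    have hjp1 : i + m - 1 + 1 = i + m := by omega
    by_cases hlast : i + m - 1 = cs.length - 1
    · rw [if_pos hlast, hcount]
      have hrest : (cs.drop i).drop m = [] := by
        rw [List.drop_drop, Nat.add_comm]
        apply List.drop_eq_nil_of_le
        omega
      conv_rhs => rw [hdrop]
      rw [specGo]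
      simp only [← hdrop, ← hm, hrest]
    · rw [if_neg hlast, hjp1]
      have him : i + m < cs.length := by omega
      have hrest : (cs.drop i).drop m = cs.drop (i + m) := by
        rw [List.drop_drop, Nat.add_comm]
      have hdrop2 : cs.drop (i + m) = cs.getD (i + m) ' ' :: cs.drop (i + m + 1) := by
        rw [List.getD_eq_getElem?_getD, List.getElem?_eq_getElem him]
        exact (List.drop_eq_getElem_cons him).trans rfl
      conv_rhs => rw [hdrop]
      rw [specGo]
      simp only [← hdrop, ← hm, hrest, hdrop2]
      by_cases hlt : char < cs.getD (i + m) ' '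
      · rw [if_pos hlt, if_pos hlt, hcount,
          ih (i + m) _ him (by omega), ← hdrop2, String.append_assoc]
      · rw [if_neg hlt, if_neg hlt, hcount,
          ih (i + m) _ him (by omega), ← hdrop2, String.append_assoc]

-- ===== VERDICT (by name: the statement is the Claim_ definition above) =====
theorem solve_spec : Claim_equal_solve := by
  intro s _ hpre
  unfold Spec_solve solve solve_alt
  have hne : s.toList ≠ [] := fun h => hpre (String.toList_eq_nil_iff.mp h)
  have hlen : 0 < s.toList.length := List.length_pos_iff.mpr hne
  simp only []
  rw [loopA_eq s.toList s.toList.length 0 "" hlen (by omega)]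
  rw [emit_eq, buildRuns_eq, specGo_emit]
  simp
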